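-- pv_equiv track=rewrite | github.com/alexandraback/datacollection | solutions_5708921029263360_0/Python/Bhajun/c.py | f
-- ===== SOURCE A (Python) =====
-- import collections, itertools, sys
--
-- def f(J, P, S, K):
--     combinations = list(itertools.product(range(1, J + 1), range(1, P + 1), range(1, S + 1)))
--     filtered = 0
--
--     JP, PS, JS = collections.defaultdict(int), collections.defaultdict(int), collections.defaultdict(int)
--
--     for j, p, s in combinations:
--         if JP[(j, p)] < K and PS[(p, s)] < K and JS[(j, s)] < K:
--             JP[(j, p)] += 1
--             PS[(p, s)] += 1
--             JS[(j, s)] += 1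
--             filtered += 1
--
--     return filtered
-- ===== SOURCE B (Python) =====
-- def f(J, P, S, K):
--     # A's greedy lexicographic scan is the classical greedy Latin-square
--     # construction scaled by blocks of size K: cell (j, p) ends up picking
--     # exactly the s-values in block z = ((j-1)//K) XOR ((p-1)//K), clipped
--     # to [1, S].  (For any block w < z, w XOR x < y or w XOR y < x -- the
--     # XOR-mex property -- so those picks are already at capacity; blocks
--     # above z are cut off by the per-cell cap K.)  So the count is a sum
--     # of closed-form cell contributions: no dicts, no scan over s.
--     if K <= 0:
--         return 0
--     total = 0
--     for j in range(J):
--         for p in range(P):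
--             z = (j // K) ^ (p // K)
--             total += max(0, min(S - z * K, K))
--     return total
-- ===== Notes on version B (the rewrite author's own statement) =====
-- stated objective: faster
-- what changed: Replaces the greedy triple scan with three capacity dicts by a closed form: by the XOR-mex (greedy Latin square) property, cell (j,p) picks exactly the s-block ((j-1)//K) XOR ((p-1)//K) clipped to [1,S], so B sums max(0, min(S - z*K, K)) over a dict-free double loop.
import Mathlib
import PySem

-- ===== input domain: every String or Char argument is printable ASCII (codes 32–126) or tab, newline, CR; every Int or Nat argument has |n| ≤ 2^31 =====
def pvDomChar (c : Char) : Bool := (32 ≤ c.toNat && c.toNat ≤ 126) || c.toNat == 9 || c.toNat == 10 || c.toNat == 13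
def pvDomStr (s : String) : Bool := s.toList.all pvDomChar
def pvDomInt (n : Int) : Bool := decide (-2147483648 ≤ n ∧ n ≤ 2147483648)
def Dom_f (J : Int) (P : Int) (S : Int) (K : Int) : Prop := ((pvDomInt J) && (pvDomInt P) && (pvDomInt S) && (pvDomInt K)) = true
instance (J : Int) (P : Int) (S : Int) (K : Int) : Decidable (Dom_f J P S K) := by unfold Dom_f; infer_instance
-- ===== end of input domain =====

-- B replaces A's greedy triple scan (three capacity dicts over the full J*P*S product) by a
-- closed form: by the XOR-mex property each cell (j,p) picks exactly the s-block
-- ((j-1)//K) XOR ((p-1)//K) clipped to [1,S], so B sums clamp(S - z*K, 0, K) over a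
-- dict-free double loop — an asymptotically faster exact re-implementation.

-- ===== PORT A =====
-- One step of A's loop body; defaultdict reads are getD 0, `+= 1` is modify _ 0 (·+1)
-- (defaultdict's insertion of a zero on a failed read does not affect any getD value, hence not the returned count).
def fStepA (K : Int)
    (st : PySem.Dict (Int × Int) Int × PySem.Dict (Int × Int) Int × PySem.Dict (Int × Int) Int × Int)
    (jps : Int × Int × Int) :
    PySem.Dict (Int × Int) Int × PySem.Dict (Int × Int) Int × PySem.Dict (Int × Int) Int × Int :=
  let (JPd, PSd, JSd, filtered) := st
  let (j, p, s) := jps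
  if JPd.getD (j, p) 0 < K ∧ PSd.getD (p, s) 0 < K ∧ JSd.getD (j, s) 0 < K then
    (JPd.modify (j, p) 0 (· + 1), PSd.modify (p, s) 0 (· + 1), JSd.modify (j, s) 0 (· + 1), filtered + 1)
  else st

def f (J : Int) (P : Int) (S : Int) (K : Int) : Int :=
  -- combinations = list(itertools.product(range(1,J+1), range(1,P+1), range(1,S+1)))
  let combinations :=
    (PySem.List.pyRange 1 (J + 1) 1).flatMap (fun j =>
      (PySem.List.pyRange 1 (P + 1) 1).flatMap (fun p =>
        (PySem.List.pyRange 1 (S + 1) 1).map (fun s => (j, p, s))))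
  (combinations.foldl (fStepA K) (PySem.Dict.empty, PySem.Dict.empty, PySem.Dict.empty, 0)).2.2.2

-- ===== PORT B =====
def f_alt (J : Int) (P : Int) (S : Int) (K : Int) : Int :=
  if K ≤ 0 then 0
  else
    (PySem.List.pyRange 0 J 1).foldl (fun total j =>
      (PySem.List.pyRange 0 P 1).foldl (fun total p =>
        total + max 0 (min (S - (PySem.Int.bxor (PySem.Int.floordiv j K) (PySem.Int.floordiv p K)) * K) K)) total) 0

-- ===== PRECONDITION & SPEC =====
def Spec_f (J : Int) (P : Int) (S : Int) (K : Int) (out : Int) : Prop := out = f_alt J P S K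
instance (J : Int) (P : Int) (S : Int) (K : Int) (out : Int) : Decidable (Spec_f J P S K out) := by unfold Spec_f; infer_instance

-- ===== CLAIM (what is proved, stated in full; the proofs are below) =====
def Claim_equal_f : Prop := ∀ (J : Int) (P : Int) (S : Int) (K : Int), Dom_f J P S K → Spec_f J P S K (f J P S K)

-- ===== LEMMAS AND PROOFS =====

-- clamp to [0, K]
def clK (K n : Int) : Int := max 0 (min n K)

-- block index of a 1-based value v (= Python's (v-1)//K for v ≥ 1, K > 0)
def blkN (K v : Int) : Nat := (v - 1).toNat / K.toNat

theorem clK_nonpos {K n : Int} (h : n ≤ 0) : clK K n = 0 := by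
  simp only [clK, max_def, min_def]; split_ifs <;> omega

theorem clK_ge {K n : Int} (hK : 0 ≤ K) (h : K ≤ n) : clK K n = K := by
  simp only [clK, max_def, min_def]; split_ifs <;> omega

theorem clK_lt {K n : Int} (hK : 0 < K) (h : n < K) : clK K n < K := by
  simp only [clK, max_def, min_def]; split_ifs <;> omega

theorem blk_lb {K v : Int} (hK : 0 < K) (hv : 1 ≤ v) : (blkN K v : Int) * K ≤ v - 1 := by
  have hKn : ((K.toNat : Int)) = K := Int.toNat_of_nonneg (le_of_lt hK)
  have hvn : (((v - 1).toNat : Int)) = v - 1 := Int.toNat_of_nonneg (by omega)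
  have hdm := Nat.div_add_mod (v - 1).toNat K.toNat
  have h1 : ((K.toNat : Int)) * ((blkN K v : Nat) : Int) + (((v - 1).toNat % K.toNat : Nat) : Int)
      = (((v - 1).toNat : Nat) : Int) := by exact_mod_cast hdm
  have h2 : (0 : Int) ≤ (((v - 1).toNat % K.toNat : Nat) : Int) := Int.natCast_nonneg _
  rw [mul_comm]
  rw [hvn, hKn] at h1
  linarith

theorem blk_ub {K v : Int} (hK : 0 < K) (hv : 1 ≤ v) : v - 1 < (blkN K v : Int) * K + K := by
  have hKn : ((K.toNat : Int)) = K := Int.toNat_of_nonneg (le_of_lt hK)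
  have hvn : (((v - 1).toNat : Int)) = v - 1 := Int.toNat_of_nonneg (by omega)
  have hdm := Nat.div_add_mod (v - 1).toNat K.toNat
  have hKpos : 0 < K.toNat := by omega
  have hmod : (v - 1).toNat % K.toNat < K.toNat := Nat.mod_lt _ hKpos
  have h1 : ((K.toNat : Int)) * ((blkN K v : Nat) : Int) + (((v - 1).toNat % K.toNat : Nat) : Int)
      = (((v - 1).toNat : Nat) : Int) := by exact_mod_cast hdm
  have h2 : (((v - 1).toNat % K.toNat : Nat) : Int) < ((K.toNat : Int)) := by exact_mod_cast hmod
  rw [hvn, hKn] at h1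
  rw [hKn] at h2
  nlinarith [h1, h2]

theorem xor_cancel_r (x y : Nat) : (x ^^^ y) ^^^ y = x := by
  rw [Nat.xor_assoc, Nat.xor_self, Nat.xor_zero]

theorem xor_cancel_l (x y : Nat) : (x ^^^ y) ^^^ x = y := by
  rw [Nat.xor_comm x y]; exact xor_cancel_r y x

theorem xor_shuffle (a b c : Nat) : a = b ^^^ c ↔ a ^^^ b = c := by
  constructor
  · rintro rfl; rw [Nat.xor_comm b c]; exact xor_cancel_r c b
  · intro h; rw [← h, Nat.xor_comm a b, ← Nat.xor_assoc, Nat.xor_self, Nat.zero_xor]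

-- if a block index g is below blkN K v, its whole block lies ≤ v - 1
theorem blk_mono_lt {K v : Int} (hK : 0 < K) (hv : 1 ≤ v) {g : Nat} (h : g < blkN K v) :
    (g : Int) * K + K ≤ v - 1 := by
  have h1 : ((g : Int) + 1) ≤ ((blkN K v : Nat) : Int) := by exact_mod_cast Nat.succ_le_of_lt h
  have h2 : ((g : Int) + 1) * K ≤ ((blkN K v : Nat) : Int) * K :=
    mul_le_mul_of_nonneg_right h1 (le_of_lt hK)
  have h3 := blk_lb hK hv (K := K) (v := v)
  nlinarith

theorem blk_mono_gt {K v : Int} (hK : 0 < K) (hv : 1 ≤ v) {g : Nat} (h : blkN K v < g) :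
    v - 1 < (g : Int) * K := by
  have h1 : ((blkN K v : Nat) : Int) + 1 ≤ (g : Int) := by exact_mod_cast Nat.succ_le_of_lt h
  have h2 : (((blkN K v : Nat) : Int) + 1) * K ≤ (g : Int) * K :=
    mul_le_mul_of_nonneg_right h1 (le_of_lt hK)
  have h3 := blk_ub hK hv (K := K) (v := v)
  nlinarith

-- one unit of scan progress: the clamp grows by 1 exactly when v falls in block g
theorem clK_step {K v : Int} (hK : 0 < K) (hv : 1 ≤ v) (g : Nat) :
    clK K (v - (g : Int) * K) = clK K (v - 1 - (g : Int) * K) + (if blkN K v = g then 1 else 0) := by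
  rcases Nat.lt_trichotomy (blkN K v) g with h | h | h
  · have h1 := blk_mono_gt hK hv h
    rw [if_neg (by omega), clK_nonpos (by linarith), clK_nonpos (by linarith)]
    omega
  · have h1 := blk_lb hK hv (K := K) (v := v)
    have h2 := blk_ub hK hv (K := K) (v := v)
    rw [h] at h1 h2
    rw [if_pos h]
    simp only [clK, max_def, min_def]; split_ifs <;> linarith
  · have h1 := blk_mono_lt hK hv h
    rw [if_neg (by omega), clK_ge (le_of_lt hK) (by linarith), clK_ge (le_of_lt hK) (by linarith)]
    omega

-- A is a no-op when K ≤ 0 (every condition 0 < K fails from the empty dicts).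
theorem fStepA_noop (K : Int) (hK : K ≤ 0) (l : List (Int × Int × Int))
    (d2 d3 : PySem.Dict (Int × Int) Int) (t : Int) :
    l.foldl (fStepA K) (PySem.Dict.empty, d2, d3, t) = (PySem.Dict.empty, d2, d3, t) := by
  induction l with
  | nil => rfl
  | cons x xs ih =>
    obtain ⟨j, p, s⟩ := x
    have : fStepA K (PySem.Dict.empty, d2, d3, t) (j, p, s) = (PySem.Dict.empty, d2, d3, t) := by
      simp only [fStepA]
      rw [if_neg]
      rintro ⟨h1, -, -⟩
      simp only [PySem.Dict.getD_empty] at h1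
      omega
    simpa [this] using ih

-- the s-scan of one cell (j,p): it picks exactly the s of block (blk j ^^^ blk p) in [u,S]
theorem cellScan (K S j p : Int) (hK : 0 < K) (hj : 1 ≤ j) (hp : 1 ≤ p) :
    ∀ (n : Nat) (u : Int), (S + 1 - u).toNat = n → 1 ≤ u → u ≤ S + 1 →
    ∀ (JPd PSd JSd : PySem.Dict (Int × Int) Int) (t : Int),
    JPd.getD (j, p) 0 = clK K ((u - 1) - ((blkN K j ^^^ blkN K p : Nat) : Int) * K) →
    (∀ s : Int, u ≤ s → s ≤ S →
      PSd.getD (p, s) 0 = clK K ((j - 1) - ((blkN K s ^^^ blkN K p : Nat) : Int) * K)) →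
    (∀ s : Int, u ≤ s → s ≤ S →
      JSd.getD (j, s) 0 = clK K ((p - 1) - ((blkN K s ^^^ blkN K j : Nat) : Int) * K)) →
    ((((PySem.List.pyRange u (S + 1) 1).foldl (fun st s => fStepA K st (j, p, s)) (JPd, PSd, JSd, t)).2.2.2
        = t + clK K (S - ((blkN K j ^^^ blkN K p : Nat) : Int) * K)
            - clK K ((u - 1) - ((blkN K j ^^^ blkN K p : Nat) : Int) * K))
     ∧ (∀ a b : Int, ¬(a = j ∧ b = p) →
         ((PySem.List.pyRange u (S + 1) 1).foldl (fun st s => fStepA K st (j, p, s)) (JPd, PSd, JSd, t)).1.getD (a, b) 0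
           = JPd.getD (a, b) 0)
     ∧ (∀ a b : Int,
         ((PySem.List.pyRange u (S + 1) 1).foldl (fun st s => fStepA K st (j, p, s)) (JPd, PSd, JSd, t)).2.1.getD (a, b) 0
           = PSd.getD (a, b) 0 + (if a = p ∧ u ≤ b ∧ b ≤ S ∧ blkN K b = blkN K j ^^^ blkN K p then 1 else 0))
     ∧ (∀ a b : Int,
         ((PySem.List.pyRange u (S + 1) 1).foldl (fun st s => fStepA K st (j, p, s)) (JPd, PSd, JSd, t)).2.2.1.getD (a, b) 0
           = JSd.getD (a, b) 0 + (if a = j ∧ u ≤ b ∧ b ≤ S ∧ blkN K b = blkN K j ^^^ blkN K p then 1 else 0))) := by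
  intro n
  induction n with
  | zero =>
    intro u hn hu1 hu2 JPd PSd JSd t hJP hPS hJS
    have hu : u = S + 1 := by omega
    subst hu
    have hnil : PySem.List.pyRange (S + 1) (S + 1) 1 = [] := PySem.List.pyRange_one_eq_nil (le_refl _)
    have hSS : (S + 1 - 1 : Int) = S := by ring
    refine ⟨?_, ?_, ?_, ?_⟩
    · rw [hnil, hSS]
      show t = t + clK K (S - ((blkN K j ^^^ blkN K p : Nat) : Int) * K)
             - clK K (S - ((blkN K j ^^^ blkN K p : Nat) : Int) * K)
      ring
    · intro a b _
      rw [hnil]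
      rfl
    · intro a b
      rw [hnil, show (if a = p ∧ S + 1 ≤ b ∧ b ≤ S ∧ blkN K b = blkN K j ^^^ blkN K p then (1 : Int) else 0) = 0
            from if_neg (by rintro ⟨-, h1, h2, -⟩; omega)]
      exact (add_zero _).symm
    · intro a b
      rw [hnil, show (if a = j ∧ S + 1 ≤ b ∧ b ≤ S ∧ blkN K b = blkN K j ^^^ blkN K p then (1 : Int) else 0) = 0
            from if_neg (by rintro ⟨-, h1, h2, -⟩; omega)]
      exact (add_zero _).symm
  | succ n ih =>
    intro u hn hu1 hu2 JPd PSd JSd t hJP hPS hJS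
    have huS : u ≤ S := by omega
    rw [PySem.List.pyRange_one_cons (by omega)]
    simp only [List.foldl_cons]
    have hxl := blk_lb hK hj (K := K) (v := j)
    have hxu := blk_ub hK hj (K := K) (v := j)
    have hyl := blk_lb hK hp (K := K) (v := p)
    have hyu := blk_ub hK hp (K := K) (v := p)
    have hwl := blk_lb hK hu1 (K := K) (v := u)
    have hwu := blk_ub hK hu1 (K := K) (v := u)
    have cPS := hPS u (le_refl _) huS
    have cJS := hJS u (le_refl _) huS
    set x := blkN K j with hx
    set y := blkN K p with hy
    set z := x ^^^ y with hz
    set w := blkN K u with hw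
    by_cases hwz : w = z
    · -- s = u is picked
      rw [hwz] at hwl hwu
      have hzy : z ^^^ y = x := xor_cancel_r x y
      have hzx : z ^^^ x = y := xor_cancel_l x y
      have hcondJP : JPd.getD (j, p) 0 < K := by
        rw [hJP]; exact clK_lt hK (by linarith)
      have hcondPS : PSd.getD (p, u) 0 < K := by
        rw [cPS, hwz, hzy]; exact clK_lt hK (by linarith)
      have hcondJS : JSd.getD (j, u) 0 < K := by
        rw [cJS, hwz, hzx]; exact clK_lt hK (by linarith)
      have hstep : fStepA K (JPd, PSd, JSd, t) (j, p, u)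
          = (JPd.modify (j, p) 0 (· + 1), PSd.modify (p, u) 0 (· + 1), JSd.modify (j, u) 0 (· + 1), t + 1) := by
        simp [fStepA, hcondJP, hcondPS, hcondJS]
      rw [hstep]
      have hstepCl : clK K (u - (z : Int) * K) = clK K (u - 1 - (z : Int) * K) + 1 := by
        have h := clK_step hK hu1 z
        rw [if_pos hwz] at h
        omega
      obtain ⟨ih1, ih2, ih3, ih4⟩ := ih (u + 1) (by omega) (by omega) (by omega)
        (JPd.modify (j, p) 0 (· + 1)) (PSd.modify (p, u) 0 (· + 1)) (JSd.modify (j, u) 0 (· + 1)) (t + 1)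
        (by rw [PySem.Dict.getD_modify_self, hJP, show (u + 1 - 1 : Int) = u from by ring, hstepCl])
        (by intro s hs1 hs2
            rw [PySem.Dict.getD_modify_of_ne _ _ _ (by
              intro h; rw [Prod.mk.injEq] at h; exact absurd h.2 (by omega))]
            exact hPS s (by omega) hs2)
        (by intro s hs1 hs2
            rw [PySem.Dict.getD_modify_of_ne _ _ _ (by
              intro h; rw [Prod.mk.injEq] at h; exact absurd h.2 (by omega))]
            exact hJS s (by omega) hs2)
      refine ⟨?_, ?_, ?_, ?_⟩
      · rw [ih1, show (u + 1 - 1 : Int) = u from by ring, hstepCl]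
        ring
      · intro a b hab
        rw [ih2 a b hab, PySem.Dict.getD_modify_of_ne _ _ _ (by
          intro h; rw [Prod.mk.injEq] at h; exact hab h)]
      · intro a b
        rw [ih3 a b]
        by_cases hbu : b = u
        · subst hbu
          rw [if_neg (by rintro ⟨-, h1, -, -⟩; omega)]
          by_cases hap : a = p
          · subst hap
            rw [PySem.Dict.getD_modify_self]
            rw [if_pos ⟨rfl, le_refl _, huS, hwz⟩]
            ring
          · rw [PySem.Dict.getD_modify_of_ne _ _ _ (by
              intro h; rw [Prod.mk.injEq] at h; exact hap h.1)]
            rw [if_neg (by rintro ⟨h, -⟩; exact hap h)]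
        · rw [PySem.Dict.getD_modify_of_ne _ _ _ (by
            intro h; rw [Prod.mk.injEq] at h; exact hbu h.2)]
          have hiff : (a = p ∧ u + 1 ≤ b ∧ b ≤ S ∧ blkN K b = z) ↔ (a = p ∧ u ≤ b ∧ b ≤ S ∧ blkN K b = z) := by
            constructor
            · rintro ⟨h1, h2, h3, h4⟩; exact ⟨h1, by omega, h3, h4⟩
            · rintro ⟨h1, h2, h3, h4⟩
              refine ⟨h1, ?_, h3, h4⟩
              rcases eq_or_lt_of_le h2 with h | h
              · exact absurd h.symm hbu
              · omega
          rw [if_congr hiff rfl rfl]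
      · intro a b
        rw [ih4 a b]
        by_cases hbu : b = u
        · subst hbu
          rw [if_neg (by rintro ⟨-, h1, -, -⟩; omega)]
          by_cases haj : a = j
          · subst haj
            rw [PySem.Dict.getD_modify_self]
            rw [if_pos ⟨rfl, le_refl _, huS, hwz⟩]
            ring
          · rw [PySem.Dict.getD_modify_of_ne _ _ _ (by
              intro h; rw [Prod.mk.injEq] at h; exact haj h.1)]
            rw [if_neg (by rintro ⟨h, -⟩; exact haj h)]
        · rw [PySem.Dict.getD_modify_of_ne _ _ _ (by
            intro h; rw [Prod.mk.injEq] at h; exact hbu h.2)]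
          have hiff : (a = j ∧ u + 1 ≤ b ∧ b ≤ S ∧ blkN K b = z) ↔ (a = j ∧ u ≤ b ∧ b ≤ S ∧ blkN K b = z) := by
            constructor
            · rintro ⟨h1, h2, h3, h4⟩; exact ⟨h1, by omega, h3, h4⟩
            · rintro ⟨h1, h2, h3, h4⟩
              refine ⟨h1, ?_, h3, h4⟩
              rcases eq_or_lt_of_le h2 with h | h
              · exact absurd h.symm hbu
              · omega
          rw [if_congr hiff rfl rfl]
    · -- s = u is not picked
      have hcond : ¬(JPd.getD (j, p) 0 < K ∧ PSd.getD (p, u) 0 < K ∧ JSd.getD (j, u) 0 < K) := by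
        rcases lt_or_gt_of_ne hwz with hlt | hgt
        · rcases Nat.lt_xor_cases hlt with hcase | hcase
          · -- w ^^^ y < x : the PS pair is full
            rintro ⟨-, h2, -⟩
            rw [cPS] at h2
            have h5 := blk_mono_lt hK hj hcase
            rw [clK_ge (le_of_lt hK) (by linarith)] at h2
            omega
          · -- w ^^^ x < y : the JS pair is full
            rintro ⟨-, -, h3⟩
            rw [cJS] at h3
            have h5 := blk_mono_lt hK hp hcase
            rw [clK_ge (le_of_lt hK) (by linarith)] at h3
            omega
        · -- z < w : the cell's own cap K is reached
          rintro ⟨h1, -, -⟩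
          rw [hJP] at h1
          have h5 : (z : Int) * K + K ≤ (w : Int) * K := by
            have hzw : ((z : Nat) : Int) + 1 ≤ ((w : Nat) : Int) := by exact_mod_cast Nat.succ_le_of_lt hgt
            nlinarith
          rw [clK_ge (le_of_lt hK) (by linarith)] at h1
          omega
      have hstep : fStepA K (JPd, PSd, JSd, t) (j, p, u) = (JPd, PSd, JSd, t) := by
        simp only [fStepA]
        exact if_neg hcond
      rw [hstep]
      have hstepCl : clK K (u - (z : Int) * K) = clK K (u - 1 - (z : Int) * K) := by
        have h := clK_step hK hu1 z
        rw [if_neg hwz] at h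
        omega
      obtain ⟨ih1, ih2, ih3, ih4⟩ := ih (u + 1) (by omega) (by omega) (by omega) JPd PSd JSd t
        (by rw [hJP, show (u + 1 - 1 : Int) = u from by ring, hstepCl])
        (fun s hs1 hs2 => hPS s (by omega) hs2)
        (fun s hs1 hs2 => hJS s (by omega) hs2)
      refine ⟨?_, ih2, ?_, ?_⟩
      · rw [ih1, show (u + 1 - 1 : Int) = u from by ring, hstepCl]
      · intro a b
        rw [ih3 a b]
        congr 1
        by_cases hbu : b = u
        · subst hbu
          rw [if_neg (by rintro ⟨-, h1, -, -⟩; omega), if_neg (by rintro ⟨-, -, -, h4⟩; exact hwz h4)]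
        · have hiff : (a = p ∧ u + 1 ≤ b ∧ b ≤ S ∧ blkN K b = z) ↔ (a = p ∧ u ≤ b ∧ b ≤ S ∧ blkN K b = z) := by
            constructor
            · rintro ⟨h1, h2, h3, h4⟩; exact ⟨h1, by omega, h3, h4⟩
            · rintro ⟨h1, h2, h3, h4⟩
              refine ⟨h1, ?_, h3, h4⟩
              rcases eq_or_lt_of_le h2 with h | h
              · exact absurd h.symm hbu
              · omega
          rw [if_congr hiff rfl rfl]
      · intro a b
        rw [ih4 a b]
        congr 1
        by_cases hbu : b = u
        · subst hbu
          rw [if_neg (by rintro ⟨-, h1, -, -⟩; omega), if_neg (by rintro ⟨-, -, -, h4⟩; exact hwz h4)]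
        · have hiff : (a = j ∧ u + 1 ≤ b ∧ b ≤ S ∧ blkN K b = z) ↔ (a = j ∧ u ≤ b ∧ b ≤ S ∧ blkN K b = z) := by
            constructor
            · rintro ⟨h1, h2, h3, h4⟩; exact ⟨h1, by omega, h3, h4⟩
            · rintro ⟨h1, h2, h3, h4⟩
              refine ⟨h1, ?_, h3, h4⟩
              rcases eq_or_lt_of_le h2 with h | h
              · exact absurd h.symm hbu
              · omega
          rw [if_congr hiff rfl rfl]

-- the p-scan of one row j
theorem rowScan (K S P j : Int) (hK : 0 < K) (hj : 1 ≤ j) :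
    ∀ (n : Nat) (v : Int), (P + 1 - v).toNat = n → 1 ≤ v → v ≤ P + 1 →
    ∀ (JPd PSd JSd : PySem.Dict (Int × Int) Int) (t : Int),
    (∀ b : Int, v ≤ b → b ≤ P → JPd.getD (j, b) 0 = 0) →
    (∀ b s : Int, v ≤ b → b ≤ P → 1 ≤ s → s ≤ S →
      PSd.getD (b, s) 0 = clK K ((j - 1) - ((blkN K s ^^^ blkN K b : Nat) : Int) * K)) →
    (∀ s : Int, 1 ≤ s → s ≤ S →
      JSd.getD (j, s) 0 = clK K ((v - 1) - ((blkN K s ^^^ blkN K j : Nat) : Int) * K)) →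
    ((((PySem.List.pyRange v (P + 1) 1).foldl (fun st q =>
          (PySem.List.pyRange 1 (S + 1) 1).foldl (fun st2 s => fStepA K st2 (j, q, s)) st)
          (JPd, PSd, JSd, t)).2.2.2
        = (PySem.List.pyRange v (P + 1) 1).foldl
            (fun acc q => acc + clK K (S - ((blkN K j ^^^ blkN K q : Nat) : Int) * K)) t)
     ∧ (∀ a b : Int, a ≠ j →
         ((PySem.List.pyRange v (P + 1) 1).foldl (fun st q =>
            (PySem.List.pyRange 1 (S + 1) 1).foldl (fun st2 s => fStepA K st2 (j, q, s)) st)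
            (JPd, PSd, JSd, t)).1.getD (a, b) 0 = JPd.getD (a, b) 0)
     ∧ (∀ a s : Int,
         ((PySem.List.pyRange v (P + 1) 1).foldl (fun st q =>
            (PySem.List.pyRange 1 (S + 1) 1).foldl (fun st2 s => fStepA K st2 (j, q, s)) st)
            (JPd, PSd, JSd, t)).2.1.getD (a, s) 0
           = PSd.getD (a, s) 0
             + (if v ≤ a ∧ a ≤ P ∧ 1 ≤ s ∧ s ≤ S ∧ blkN K s = blkN K j ^^^ blkN K a then 1 else 0))
     ∧ (∀ a s : Int, a ≠ j →
         ((PySem.List.pyRange v (P + 1) 1).foldl (fun st q =>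
            (PySem.List.pyRange 1 (S + 1) 1).foldl (fun st2 s => fStepA K st2 (j, q, s)) st)
            (JPd, PSd, JSd, t)).2.2.1.getD (a, s) 0 = JSd.getD (a, s) 0)) := by
  intro n
  induction n with
  | zero =>
    intro v hn hv1 hv2 JPd PSd JSd t hJP0 hPS hJS
    have hv : v = P + 1 := by omega
    subst hv
    have hnil : PySem.List.pyRange (P + 1) (P + 1) 1 = [] := PySem.List.pyRange_one_eq_nil (le_refl _)
    refine ⟨?_, ?_, ?_, ?_⟩
    · rw [hnil]
      rfl
    · intro a b _
      rw [hnil]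
      rfl
    · intro a s
      rw [hnil, show (if P + 1 ≤ a ∧ a ≤ P ∧ 1 ≤ s ∧ s ≤ S ∧ blkN K s = blkN K j ^^^ blkN K a then (1 : Int) else 0) = 0
            from if_neg (by rintro ⟨h1, h2, -⟩; omega)]
      exact (add_zero _).symm
    · intro a s _
      rw [hnil]
      rfl
  | succ n ih =>
    intro v hn hv1 hv2 JPd PSd JSd t hJP0 hPS hJS
    have hvP : v ≤ P := by omega
    rw [PySem.List.pyRange_one_cons (show v < P + 1 by omega)]
    simp only [List.foldl_cons]
    by_cases hS : 0 ≤ S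
    · -- run the cell (j, v)
      have hzK : (0 : Int) ≤ ((blkN K j ^^^ blkN K v : Nat) : Int) * K :=
        mul_nonneg (Int.natCast_nonneg _) (le_of_lt hK)
      obtain ⟨c1, c2, c3, c4⟩ := cellScan K S j v hK hj hv1 S.toNat 1 (by omega) (le_refl _) (by omega)
        JPd PSd JSd t
        (by rw [hJP0 v (le_refl _) hvP]
            rw [clK_nonpos (by linarith)])
        (fun s hs1 hs2 => hPS v s (le_refl _) hvP hs1 hs2)
        (fun s hs1 hs2 => hJS s hs1 hs2)
      set st1 := (PySem.List.pyRange 1 (S + 1) 1).foldl (fun st2 s => fStepA K st2 (j, v, s))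
        (JPd, PSd, JSd, t) with hst1
      obtain ⟨ih1, ih2, ih3, ih4⟩ := ih (v + 1) (by omega) (by omega) (by omega)
        st1.1 st1.2.1 st1.2.2.1 st1.2.2.2
        (by intro b hb1 hb2
            rw [c2 j b (by rintro ⟨-, h⟩; omega)]
            exact hJP0 b (by omega) hb2)
        (by intro b s hb1 hb2 hs1 hs2
            rw [c3 b s, if_neg (by rintro ⟨h, -⟩; omega)]
            rw [hPS b s (by omega) hb2 hs1 hs2]; ring)
        (by intro s hs1 hs2
            rw [c4 j s, hJS s hs1 hs2]
            have h14 : (if j = j ∧ 1 ≤ s ∧ s ≤ S ∧ blkN K s = blkN K j ^^^ blkN K v then (1 : Int) else 0)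
                = (if blkN K v = blkN K s ^^^ blkN K j then (1 : Int) else 0) := by
              by_cases hc : blkN K s = blkN K j ^^^ blkN K v
              · rw [if_pos ⟨rfl, hs1, hs2, hc⟩, if_pos (((xor_shuffle _ _ _).mp hc).symm)]
              · rw [if_neg (by rintro ⟨-, -, -, h4⟩; exact hc h4),
                    if_neg (fun h5 => hc ((xor_shuffle _ _ _).mpr h5.symm))]
            rw [h14, show (v + 1 - 1 : Int) = v from by ring,
                clK_step hK hv1 (blkN K s ^^^ blkN K j)])
      have hEta : (st1.1, st1.2.1, st1.2.2.1, st1.2.2.2) = st1 := rfl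
      rw [hEta] at ih1 ih2 ih3 ih4
      refine ⟨?_, ?_, ?_, ?_⟩
      · rw [ih1, c1,
            show ((1 : Int) - 1 - ((blkN K j ^^^ blkN K v : Nat) : Int) * K)
              = -(((blkN K j ^^^ blkN K v : Nat) : Int) * K) from by ring,
            clK_nonpos (neg_nonpos_of_nonneg hzK), sub_zero]
      · intro a b ha
        rw [ih2 a b ha, c2 a b (by rintro ⟨h, -⟩; exact ha h)]
      · intro a s0
        rw [ih3 a s0, c3 a s0]
        by_cases ha : a = v
        · have h2 : (if v + 1 ≤ a ∧ a ≤ P ∧ 1 ≤ s0 ∧ s0 ≤ S ∧ blkN K s0 = blkN K j ^^^ blkN K a then (1 : Int) else 0) = 0 :=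
            if_neg (by rintro ⟨h, -⟩; omega)
          have h13 : (if a = v ∧ 1 ≤ s0 ∧ s0 ≤ S ∧ blkN K s0 = blkN K j ^^^ blkN K v then (1 : Int) else 0)
              = (if v ≤ a ∧ a ≤ P ∧ 1 ≤ s0 ∧ s0 ≤ S ∧ blkN K s0 = blkN K j ^^^ blkN K a then (1 : Int) else 0) := by
            subst ha
            by_cases hQ : 1 ≤ s0 ∧ s0 ≤ S ∧ blkN K s0 = blkN K j ^^^ blkN K a
            · rw [if_pos ⟨rfl, hQ.1, hQ.2.1, hQ.2.2⟩, if_pos ⟨le_refl _, hvP, hQ.1, hQ.2.1, hQ.2.2⟩]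
            · rw [if_neg (by rintro ⟨-, hq1, hq2, hq3⟩; exact hQ ⟨hq1, hq2, hq3⟩),
                  if_neg (by rintro ⟨-, -, hq1, hq2, hq3⟩; exact hQ ⟨hq1, hq2, hq3⟩)]
          rw [h2, h13]
          ring
        · have h1 : (if a = v ∧ 1 ≤ s0 ∧ s0 ≤ S ∧ blkN K s0 = blkN K j ^^^ blkN K v then (1 : Int) else 0) = 0 :=
            if_neg (by rintro ⟨h, -⟩; exact ha h)
          have h23 : (if v + 1 ≤ a ∧ a ≤ P ∧ 1 ≤ s0 ∧ s0 ≤ S ∧ blkN K s0 = blkN K j ^^^ blkN K a then (1 : Int) else 0)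
              = (if v ≤ a ∧ a ≤ P ∧ 1 ≤ s0 ∧ s0 ≤ S ∧ blkN K s0 = blkN K j ^^^ blkN K a then (1 : Int) else 0) := by
            by_cases hR : a ≤ P ∧ 1 ≤ s0 ∧ s0 ≤ S ∧ blkN K s0 = blkN K j ^^^ blkN K a
            · by_cases hva : v ≤ a
              · have hva' : v + 1 ≤ a := by
                  rcases eq_or_lt_of_le hva with h | h
                  · exact absurd h.symm ha
                  · omega
                rw [if_pos ⟨hva', hR.1, hR.2.1, hR.2.2.1, hR.2.2.2⟩,
                    if_pos ⟨hva, hR.1, hR.2.1, hR.2.2.1, hR.2.2.2⟩]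
              · rw [if_neg (by rintro ⟨h, -⟩; omega), if_neg (by rintro ⟨h, -⟩; exact hva h)]
            · rw [if_neg (by rintro ⟨-, h2, h3, h4, h5⟩; exact hR ⟨h2, h3, h4, h5⟩),
                  if_neg (by rintro ⟨-, h2, h3, h4, h5⟩; exact hR ⟨h2, h3, h4, h5⟩)]
          rw [h1, h23]
          ring
      · intro a s0 ha
        rw [ih4 a s0 ha, c4 a s0, if_neg (by rintro ⟨h, -⟩; exact ha h)]
        ring
    · -- S < 0 : the s-range is empty, nothing happens in this row
      have hnilS : PySem.List.pyRange 1 (S + 1) 1 = [] := PySem.List.pyRange_one_eq_nil (by omega)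
      obtain ⟨ih1, ih2, ih3, ih4⟩ := ih (v + 1) (by omega) (by omega) (by omega) JPd PSd JSd t
        (fun b hb1 hb2 => hJP0 b (by omega) hb2)
        (fun b s hb1 hb2 hs1 hs2 => hPS b s (by omega) hb2 hs1 hs2)
        (fun s hs1 hs2 => absurd (le_trans hs1 hs2) (by omega))
      simp only [hnilS, List.foldl_nil] at ih1 ih2 ih3 ih4 ⊢
      have hzK : (0 : Int) ≤ ((blkN K j ^^^ blkN K v : Nat) : Int) * K :=
        mul_nonneg (Int.natCast_nonneg _) (le_of_lt hK)
      refine ⟨?_, ih2, ?_, ih4⟩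
      · rw [ih1]
        congr 1
        rw [clK_nonpos (by linarith)]
        ring
      · intro a s0
        rw [ih3 a s0,
            show (if v + 1 ≤ a ∧ a ≤ P ∧ 1 ≤ s0 ∧ s0 ≤ S ∧ blkN K s0 = blkN K j ^^^ blkN K a then (1 : Int) else 0) = 0
              from if_neg (by rintro ⟨-, -, h3, h4, -⟩; omega),
            show (if v ≤ a ∧ a ≤ P ∧ 1 ≤ s0 ∧ s0 ≤ S ∧ blkN K s0 = blkN K j ^^^ blkN K a then (1 : Int) else 0) = 0
              from if_neg (by rintro ⟨-, -, h3, h4, -⟩; omega)]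

-- the j-scan over all rows
theorem outerScan (K S P J : Int) (hK : 0 < K) :
    ∀ (n : Nat) (u : Int), (J + 1 - u).toNat = n → 1 ≤ u → u ≤ J + 1 →
    ∀ (JPd PSd JSd : PySem.Dict (Int × Int) Int) (t : Int),
    (∀ a b : Int, u ≤ a → JPd.getD (a, b) 0 = 0) →
    (∀ b s : Int, 1 ≤ b → b ≤ P → 1 ≤ s → s ≤ S →
      PSd.getD (b, s) 0 = clK K ((u - 1) - ((blkN K s ^^^ blkN K b : Nat) : Int) * K)) →
    (∀ a s : Int, u ≤ a → JSd.getD (a, s) 0 = 0) →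
    ((PySem.List.pyRange u (J + 1) 1).foldl (fun st q =>
        (PySem.List.pyRange 1 (P + 1) 1).foldl (fun st2 b =>
          (PySem.List.pyRange 1 (S + 1) 1).foldl (fun st3 s => fStepA K st3 (q, b, s)) st2) st)
        (JPd, PSd, JSd, t)).2.2.2
      = (PySem.List.pyRange u (J + 1) 1).foldl (fun acc q =>
          (PySem.List.pyRange 1 (P + 1) 1).foldl (fun acc2 b =>
            acc2 + clK K (S - ((blkN K q ^^^ blkN K b : Nat) : Int) * K)) acc) t := by
  intro n
  induction n with
  | zero =>
    intro u hn hu1 hu2 JPd PSd JSd t _ _ _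
    have hu : u = J + 1 := by omega
    subst hu
    rw [PySem.List.pyRange_one_eq_nil (le_refl _)]
    rfl
  | succ n ih =>
    intro u hn hu1 hu2 JPd PSd JSd t hJP0 hPS hJS0
    rw [PySem.List.pyRange_one_cons (show u < J + 1 by omega)]
    simp only [List.foldl_cons]
    by_cases hP : 0 ≤ P
    · obtain ⟨r1, r2, r3, r4⟩ := rowScan K S P u hK hu1 P.toNat 1 (by omega) (le_refl _) (by omega)
        JPd PSd JSd t
        (fun b hb1 hb2 => hJP0 u b (le_refl _))
        (fun b s hb1 hb2 hs1 hs2 => hPS b s hb1 hb2 hs1 hs2)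
        (by intro s hs1 hs2
            rw [hJS0 u s (le_refl _)]
            have hzK : (0 : Int) ≤ ((blkN K s ^^^ blkN K u : Nat) : Int) * K :=
              mul_nonneg (Int.natCast_nonneg _) (le_of_lt hK)
            rw [clK_nonpos (by linarith)])
      set st1 := (PySem.List.pyRange 1 (P + 1) 1).foldl (fun st2 b =>
          (PySem.List.pyRange 1 (S + 1) 1).foldl (fun st3 s => fStepA K st3 (u, b, s)) st2)
          (JPd, PSd, JSd, t) with hst1
      have hout := ih (u + 1) (by omega) (by omega) (by omega)
        st1.1 st1.2.1 st1.2.2.1 st1.2.2.2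
        (by intro a b ha
            rw [r2 a b (by omega)]
            exact hJP0 a b (by omega))
        (by intro b s hb1 hb2 hs1 hs2
            rw [r3 b s, hPS b s hb1 hb2 hs1 hs2]
            have h14 : (if 1 ≤ b ∧ b ≤ P ∧ 1 ≤ s ∧ s ≤ S ∧ blkN K s = blkN K u ^^^ blkN K b then (1 : Int) else 0)
                = (if blkN K u = blkN K s ^^^ blkN K b then (1 : Int) else 0) := by
              by_cases hc : blkN K s = blkN K u ^^^ blkN K b
              · have hc' : blkN K s = blkN K b ^^^ blkN K u := by
                  rw [Nat.xor_comm (blkN K b) (blkN K u)]; exact hc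
                rw [if_pos ⟨hb1, hb2, hs1, hs2, hc⟩, if_pos (((xor_shuffle _ _ _).mp hc').symm)]
              · rw [if_neg (by rintro ⟨-, -, -, -, h5⟩; exact hc h5), if_neg (fun h5 => hc (by
                  have h6 : blkN K s = blkN K b ^^^ blkN K u := (xor_shuffle _ _ _).mpr h5.symm
                  rw [Nat.xor_comm (blkN K b) (blkN K u)] at h6
                  exact h6))]
            rw [h14, show (u + 1 - 1 : Int) = u from by ring,
                clK_step hK hu1 (blkN K s ^^^ blkN K b)])
        (by intro a s ha
            rw [r4 a s (by omega)]
            exact hJS0 a s (by omega))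
      have hEta : (st1.1, st1.2.1, st1.2.2.1, st1.2.2.2) = st1 := rfl
      rw [hEta] at hout
      rw [hout, r1]
    · -- P < 0 : every row is empty
      have hnilP : PySem.List.pyRange 1 (P + 1) 1 = [] := PySem.List.pyRange_one_eq_nil (by omega)
      have h := ih (u + 1) (by omega) (by omega) (by omega) JPd PSd JSd t
        (fun a b ha => hJP0 a b (by omega))
        (fun b s hb1 hb2 hs1 hs2 => absurd (le_trans hb1 hb2) (by omega))
        (fun a s ha => hJS0 a s (by omega))
      simp only [hnilP, List.foldl_nil] at h ⊢
      exact h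

-- fold over the flattened product = nested folds
theorem foldl_flatMap {α β γ : Type} (xs : List α) (g : α → List β) (step : γ → β → γ) (init : γ) :
    (xs.flatMap g).foldl step init = xs.foldl (fun st x => (g x).foldl step st) init := by
  induction xs generalizing init with
  | nil => rfl
  | cons x xs ih => simp [List.flatMap_cons, List.foldl_append, ih]

theorem f_eq_alt (J P S K : Int) : f J P S K = f_alt J P S K := by
  by_cases hK : K ≤ 0
  · simp only [f, f_alt, if_pos hK]
    rw [fStepA_noop K hK]
  · have hK' : 0 < K := by omega
    simp only [f, f_alt, if_neg hK]
    rw [foldl_flatMap]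
    have h2 : ∀ st : PySem.Dict (Int × Int) Int × PySem.Dict (Int × Int) Int ×
        PySem.Dict (Int × Int) Int × Int, ∀ q : Int,
        ((PySem.List.pyRange 1 (P + 1) 1).flatMap (fun p =>
          (PySem.List.pyRange 1 (S + 1) 1).map (fun s => (q, p, s)))).foldl (fStepA K) st
        = (PySem.List.pyRange 1 (P + 1) 1).foldl
            (fun st2 b => (PySem.List.pyRange 1 (S + 1) 1).foldl
              (fun st3 s => fStepA K st3 (q, b, s)) st2) st := by
      intro st q
      rw [foldl_flatMap]
      simp only [List.foldl_map]
    simp only [h2]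
    by_cases hJ : 0 ≤ J
    · rw [outerScan K S P J hK' J.toNat 1 (by omega) (le_refl _) (by omega)
        PySem.Dict.empty PySem.Dict.empty PySem.Dict.empty 0
        (fun a b _ => PySem.Dict.getD_empty _ _)
        (by intro b s _ _ _ _
            rw [PySem.Dict.getD_empty]
            have hzK : (0 : Int) ≤ ((blkN K s ^^^ blkN K b : Nat) : Int) * K :=
              mul_nonneg (Int.natCast_nonneg _) (le_of_lt hK')
            rw [clK_nonpos (by linarith)])
        (fun a s _ => PySem.Dict.getD_empty _ _)]
      -- both sides are now pure arithmetic folds; align the index ranges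
      have hKn : ((K.toNat : Int)) = K := Int.toNat_of_nonneg (by omega)
      have hblk : ∀ m : Nat, blkN K (1 + (m : Int)) = m / K.toNat := by
        intro m
        unfold blkN
        rw [show (1 + (m : Int) - 1) = (m : Int) from by ring, Int.toNat_natCast]
      have hcell : ∀ m m2 : Nat,
          clK K (S - ((blkN K (1 + (m : Int)) ^^^ blkN K (1 + (m2 : Int)) : Nat) : Int) * K)
          = max 0 (min (S - (PySem.Int.bxor (PySem.Int.floordiv (0 + (m : Int)) K)
              (PySem.Int.floordiv (0 + (m2 : Int)) K)) * K) K) := by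
        intro m m2
        rw [hblk m, hblk m2]
        rw [show ((0 : Int) + (m : Int)) = ((m : Nat) : Int) from by ring,
            show ((0 : Int) + (m2 : Int)) = ((m2 : Nat) : Int) from by ring]
        rw [← hKn, PySem.Int.floordiv_natCast, PySem.Int.floordiv_natCast, PySem.Int.bxor_natCast]
        rw [hKn]
        rfl
      rw [PySem.List.pyRange_one 1 (J + 1), PySem.List.pyRange_one 0 J]
      rw [show (J + 1 - 1 : Int) = J from by ring, show (J - 0 : Int) = J from by ring]
      rw [List.foldl_map, List.foldl_map]
      apply PySem.List.foldl_congr_mem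
      intro acc k _
      rw [PySem.List.pyRange_one 1 (P + 1), PySem.List.pyRange_one 0 P]
      rw [show (P + 1 - 1 : Int) = P from by ring, show (P - 0 : Int) = P from by ring]
      rw [List.foldl_map, List.foldl_map]
      apply PySem.List.foldl_congr_mem
      intro acc2 k2 _
      rw [hcell k k2]
    · -- J < 0 : both ranges are empty
      rw [PySem.List.pyRange_one_eq_nil (show J + 1 ≤ 1 by omega),
          PySem.List.pyRange_one_eq_nil (show J ≤ 0 by omega)]
      rfl

-- ===== VERDICT (by name: the statement is the Claim_ definition above) =====
theorem f_spec : Claim_equal_f := by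
  intro J P S K _
  show f J P S K = f_alt J P S K
  exact f_eq_alt J P S K
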